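-- pv_equiv track=rewrite | github.com/jethridge13/AdventOfCode2017 | Day4.py | lineCalc2
-- ===== SOURCE A (Python) =====
-- def lineCalc(l):
-- 	l = l.split()
-- 	l.sort()
-- 	for i in range(len(l)):
-- 		if i + 1 < len(l):
-- 			if l[i] == l[i + 1]:
-- 				return False
-- 	return True
--
-- def lineCalc2(l):
-- 	l = l.split()
-- 	l.sort()
-- 	for i in range(len(l)):
-- 		s = ''.join(sorted(l[i]))
-- 		l[i] = s
-- 	l = ' '.join(l)
-- 	return lineCalc(l)
-- ===== SOURCE B (Python) =====
-- def lineCalc2(l):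
--     sigs = [''.join(sorted(w)) for w in l.split()]
--     return len(set(sigs)) == len(sigs)
-- ===== Notes on version B (the rewrite author's own statement) =====
-- stated objective: simpler
-- what changed: Replaces the sort-words / rewrite-in-place / rejoin / resplit / sort-again / adjacent-pair scan pipeline with one pass building anagram signatures and a set-size vs list-size comparison.
import Mathlib
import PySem

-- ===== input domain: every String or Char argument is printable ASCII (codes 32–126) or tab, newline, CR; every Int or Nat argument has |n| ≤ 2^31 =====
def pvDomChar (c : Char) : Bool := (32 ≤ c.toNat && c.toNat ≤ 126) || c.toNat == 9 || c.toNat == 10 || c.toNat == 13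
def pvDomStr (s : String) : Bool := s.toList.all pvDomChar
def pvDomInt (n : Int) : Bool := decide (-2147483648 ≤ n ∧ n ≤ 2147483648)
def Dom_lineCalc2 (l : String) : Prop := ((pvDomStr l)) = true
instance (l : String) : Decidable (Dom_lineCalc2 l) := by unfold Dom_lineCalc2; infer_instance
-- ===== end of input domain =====

-- B replaces A's sort/rewrite/rejoin/resplit/sort/adjacent-scan pipeline by anagram
-- signatures checked for duplicates with a set (objective: simpler).

-- ===== PORT A =====
-- the indexed loop 'for i in range(len(l)): if i+1<len(l): if l[i]==l[i+1]: return False'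
def pvAdjScan : List String → Bool
  | a :: b :: rest => if a == b then false else pvAdjScan (b :: rest)
  | _ => true

def pvLineCalc (l : String) : Bool :=
  let ws := PySem.Str.split₀ l
  let ws := PySem.List.sorted ws (fun x => x) false
  pvAdjScan ws

def lineCalc2 (l : String) : Bool :=
  let ws := PySem.Str.split₀ l
  let ws := PySem.List.sorted ws (fun x => x) false
  -- 'for i …: l[i] = ''.join(sorted(l[i]))' — the in-place rewrite of every slot is a map;
  -- sorted over the word's 1-char strings is sorted over its chars (same code-point order)
  let ws := ws.map (fun w => String.ofList (PySem.List.sorted w.toList (fun c => c) false))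
  let j := PySem.Str.join " " ws
  pvLineCalc j

-- ===== PORT B =====
def lineCalc2_alt (l : String) : Bool :=
  let sigs := (PySem.Str.split₀ l).map
    (fun w => String.ofList (PySem.List.sorted w.toList (fun c => c) false))
  PySem.Set.len (PySem.Set.ofList sigs) == (sigs.length : Int)

-- ===== PRECONDITION & SPEC =====
def Spec_lineCalc2 (l : String) (out : Bool) : Prop := out = lineCalc2_alt l
instance (l : String) (out : Bool) : Decidable (Spec_lineCalc2 l out) := by unfold Spec_lineCalc2; infer_instance

-- ===== CLAIM (what is proved, stated in full; the proofs are below) =====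
def Claim_equal_lineCalc2 : Prop := ∀ (l : String), Dom_lineCalc2 l → Spec_lineCalc2 l (lineCalc2 l)

-- ===== LEMMAS AND PROOFS =====

-- every word produced by split₀ is nonempty and contains no whitespace character
theorem pv_go_mem (s : List Char) : ∀ (cur : List Char) (acc : List (List Char)),
    (∀ c ∈ cur, PySem.Chars.isspace c = false) →
    (∀ w ∈ acc, w ≠ [] ∧ ∀ c ∈ w, PySem.Chars.isspace c = false) →
    ∀ w ∈ PySem.Chars.split₀.go s cur acc, w ≠ [] ∧ ∀ c ∈ w, PySem.Chars.isspace c = false := by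
  induction s with
  | nil =>
    intro cur acc hcur hacc w hw
    by_cases h : cur.isEmpty = true
    · simp [PySem.Chars.split₀.go, h] at hw
      exact hacc w hw
    · simp [PySem.Chars.split₀.go, h] at hw
      rcases hw with h1 | h1
      · exact hacc w h1
      · subst h1
        refine ⟨by simpa [List.isEmpty_iff] using h, ?_⟩
        intro c hc; exact hcur c (by simpa using hc)
  | cons c rest ih =>
    intro cur acc hcur hacc w hw
    by_cases hs : PySem.Chars.isspace c = true
    · by_cases he : cur.isEmpty = true
      · simp [PySem.Chars.split₀.go, hs, he] at hw
        exact ih [] acc (by simp) hacc w hw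
      · simp [PySem.Chars.split₀.go, hs, he] at hw
        refine ih [] (cur.reverse :: acc) (by simp) ?_ w hw
        intro v hv
        rw [List.mem_cons] at hv
        rcases hv with hv | hv
        · subst hv
          refine ⟨by simpa [List.isEmpty_iff] using he, ?_⟩
          intro d hd; exact hcur d (by simpa using hd)
        · exact hacc v hv
    · simp [PySem.Chars.split₀.go, hs] at hw
      refine ih (c :: cur) acc ?_ hacc w hw
      intro d hd
      rw [List.mem_cons] at hd
      rcases hd with hd | hd
      · subst hd; simpa using hs
      · exact hcur d hd

theorem pv_split₀_mem (s : List Char) (w : List Char) (hw : w ∈ PySem.Chars.split₀ s) :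
    w ≠ [] ∧ ∀ c ∈ w, PySem.Chars.isspace c = false :=
  pv_go_mem s [] [] (by simp) (by simp) w hw

-- consuming a whitespace-free chunk
theorem pv_go_word (w : List Char) : ∀ (rest cur : List Char) (acc : List (List Char)),
    (∀ c ∈ w, PySem.Chars.isspace c = false) →
    PySem.Chars.split₀.go (w ++ rest) cur acc = PySem.Chars.split₀.go rest (w.reverse ++ cur) acc := by
  induction w with
  | nil => intro rest cur acc _; simp
  | cons c t ih =>
    intro rest cur acc h
    have hc : PySem.Chars.isspace c = false := h c (by simp)
    simp only [List.cons_append, PySem.Chars.split₀.go, hc]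
    rw [ih rest (c :: cur) acc (fun d hd => h d (by simp [hd]))]
    simp

theorem pv_go_word' (w cur : List Char) (acc : List (List Char))
    (h : ∀ c ∈ w, PySem.Chars.isspace c = false) :
    PySem.Chars.split₀.go w cur acc = PySem.Chars.split₀.go [] (w.reverse ++ cur) acc := by
  simpa using pv_go_word w [] cur acc h

-- the ' '.join / split() round trip on nonempty whitespace-free parts
theorem pv_split_join (parts : List (List Char))
    (h : ∀ w ∈ parts, w ≠ [] ∧ ∀ c ∈ w, PySem.Chars.isspace c = false) :
    PySem.Chars.split₀ (PySem.Chars.join [' '] parts) = parts := by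
  suffices hgo : ∀ (ps : List (List Char)), (∀ w ∈ ps, w ≠ [] ∧ ∀ c ∈ w, PySem.Chars.isspace c = false) →
      ∀ acc, PySem.Chars.split₀.go (List.intercalate [' '] ps) [] acc = acc.reverse ++ ps by
    simpa [PySem.Chars.split₀, PySem.Chars.join] using hgo parts h []
  intro ps
  induction ps with
  | nil => intro _ acc; simp [List.intercalate, PySem.Chars.split₀.go]
  | cons p t ih =>
    intro hps acc
    obtain ⟨hp, hpc⟩ := hps p (by simp)
    cases t with
    | nil =>
      have h1 : List.intercalate [' '] [p] = p := by
        simp [List.intercalate]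
      rw [h1, pv_go_word' p [] acc hpc]
      simp [PySem.Chars.split₀.go, List.isEmpty_iff, hp]
    | cons q u =>
      have hsp : PySem.Chars.isspace ' ' = true := by decide
      have h1 : List.intercalate [' '] (p :: q :: u) = p ++ ' ' :: List.intercalate [' '] (q :: u) := by
        simp [List.intercalate, List.intersperse]
      rw [h1, pv_go_word p _ [] acc hpc]
      have hstep : PySem.Chars.split₀.go (' ' :: List.intercalate [' '] (q :: u)) (p.reverse ++ []) acc
          = PySem.Chars.split₀.go (List.intercalate [' '] (q :: u)) [] (p :: acc) := by
        simp [PySem.Chars.split₀.go, hsp, List.isEmpty_iff, hp]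
      rw [hstep, ih (fun w hw => hps w (by simp [hw])) (p :: acc)]
      simp

-- |set(xs)| = |xs| iff xs has no duplicates
theorem pv_foldl_add_len_le {α : Type} [BEq α] [LawfulBEq α] (xs : List α) :
    ∀ s : PySem.Set α, (xs.foldl PySem.Set.add s).length ≤ s.length + xs.length := by
  induction xs with
  | nil => intro s; simp
  | cons x t ih =>
    intro s
    calc (List.foldl PySem.Set.add (s.add x) t).length ≤ (s.add x).length + t.length := ih _
    _ ≤ s.length + (t.length + 1) := by
        unfold PySem.Set.add; split
        · simp
        · simp; omega

theorem pv_foldl_add_len_lt {α : Type} [BEq α] [LawfulBEq α] (xs : List α) :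
    ∀ s : PySem.Set α, ((∃ x ∈ xs, x ∈ s) ∨ ¬ xs.Nodup) →
    (xs.foldl PySem.Set.add s).length < s.length + xs.length := by
  induction xs with
  | nil => intro s h; simp at h
  | cons x t ih =>
    intro s h
    by_cases hx : x ∈ s
    · have hadd : s.add x = s := by
        unfold PySem.Set.add; simp [hx]
      calc (List.foldl PySem.Set.add (s.add x) t).length
          ≤ (s.add x).length + t.length := pv_foldl_add_len_le t _
        _ = s.length + t.length := by rw [hadd]
        _ < s.length + (x :: t).length := by simp
    · have hlen : (s.add x).length = s.length + 1 := by
        unfold PySem.Set.add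
        simp [hx]
      have hcase : (∃ y ∈ t, y ∈ s.add x) ∨ ¬ t.Nodup := by
        rcases h with ⟨y, hy, hys⟩ | hnd
        · rw [List.mem_cons] at hy
          rcases hy with hy | hy
          · exact absurd (hy ▸ hys) hx
          · exact Or.inl ⟨y, hy, (PySem.Set.mem_add s x y).mpr (Or.inl hys)⟩
        · by_cases ht : t.Nodup
          · have hxt : x ∈ t := by
              by_contra hxt
              exact hnd (List.nodup_cons.mpr ⟨hxt, ht⟩)
            exact Or.inl ⟨x, hxt, (PySem.Set.mem_add s x x).mpr (Or.inr rfl)⟩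
          · exact Or.inr ht
      calc (List.foldl PySem.Set.add (s.add x) t).length
          < (s.add x).length + t.length := ih _ hcase
        _ = s.length + (x :: t).length := by simp [hlen]; omega

theorem pv_ofList_len_iff {α : Type} [BEq α] [LawfulBEq α] (xs : List α) :
    (PySem.Set.ofList xs).length = xs.length ↔ xs.Nodup := by
  constructor
  · intro h
    by_contra hnd
    have := pv_foldl_add_len_lt xs PySem.Set.empty (Or.inr hnd)
    simp only [PySem.Set.ofList] at h
    simp [PySem.Set.empty] at h this
    omega
  · intro hnd
    have := PySem.Set.update_eq_append_of_disjoint (PySem.Set.empty (α := α)) xs hnd (by simp [PySem.Set.empty])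
    simp only [PySem.Set.ofList, ← PySem.Set.update_eq_foldl] at *
    simp [PySem.Set.empty] at this ⊢
    rw [this]

-- on a ≤-sorted list, no adjacent equal pair ⟺ no duplicates at all
theorem pv_adjScan_iff (l : List String) (h : l.Pairwise (· ≤ ·)) :
    pvAdjScan l = true ↔ l.Nodup := by
  induction l with
  | nil => simp [pvAdjScan]
  | cons a t ih =>
    cases t with
    | nil => simp [pvAdjScan]
    | cons b u =>
      rcases List.pairwise_cons.mp h with ⟨hab, hbu⟩
      by_cases he : a = b
      · subst he
        simp [pvAdjScan, List.nodup_cons]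
      · have hlt : a < b := lt_of_le_of_ne (hab b (by simp)) he
        have hnotmem : a ∉ b :: u := by
          intro hmem
          rw [List.mem_cons] at hmem
          rcases hmem with hmem | hmem
          · exact he hmem
          · have hbx : b ≤ a := (List.pairwise_cons.mp hbu).1 a hmem
            exact absurd (lt_of_lt_of_le hlt hbx) (lt_irrefl a)
        simp only [pvAdjScan, beq_iff_eq, if_neg he]
        rw [ih hbu]
        simp [List.nodup_cons, hnotmem]

-- ===== VERDICT (by name: the statement is the Claim_ definition above) =====
theorem lineCalc2_spec : Claim_equal_lineCalc2 := by
  intro l _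
  unfold Spec_lineCalc2
  show lineCalc2 l = lineCalc2_alt l
  simp only [lineCalc2, lineCalc2_alt, pvLineCalc]
  -- names
  set sig : String → String := fun w => String.ofList (PySem.List.sorted w.toList (fun c => c) false) with hsig
  set ws := PySem.Str.split₀ l with hws
  set sigs := ws.map sig with hsigs
  set inner := (PySem.List.sorted ws (fun x => x) false).map sig with hinner
  -- every element of inner is a nonempty whitespace-free word
  have hchunks : ∀ w ∈ inner.map String.toList, w ≠ [] ∧ ∀ c ∈ w, PySem.Chars.isspace c = false := by
    intro w hw
    simp only [hinner, List.map_map, List.mem_map] at hw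
    obtain ⟨v, hv, rfl⟩ := hw
    have hv' : v ∈ ws := (PySem.List.mem_sorted _ _ _ _).mp hv
    have hvw : v.toList ∈ PySem.Chars.split₀ l.toList := by
      rw [← PySem.Str.split₀_map_toList]
      exact List.mem_map_of_mem hv'
    obtain ⟨hne, hsp⟩ := pv_split₀_mem l.toList v.toList hvw
    have hperm : (PySem.List.sorted v.toList (fun c => c) false).Perm v.toList :=
      PySem.List.sorted_perm _ _ _
    constructor
    · simp only [Function.comp, hsig, String.toList_ofList]
      intro hnil
      exact hne (List.Perm.nil_eq (hnil ▸ hperm)).symm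
    · intro c hc
      simp only [Function.comp, hsig, String.toList_ofList] at hc
      exact hsp c (hperm.mem_iff.mp hc)
  -- the rejoin/resplit recovers inner
  have hsplit : PySem.Str.split₀ (PySem.Str.join " " inner) = inner := by
    have h1 : (PySem.Str.join " " inner).toList
        = PySem.Chars.join [' '] (inner.map String.toList) := by
      simp [PySem.Str.join, String.toList_ofList]
    have h2 := pv_split_join (inner.map String.toList) hchunks
    have : PySem.Str.split₀ (PySem.Str.join " " inner)
        = (PySem.Chars.split₀ (PySem.Str.join " " inner).toList).map String.ofList := by
      simp [PySem.Str.split₀]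
    rw [this, h1, h2, List.map_map]
    have : String.ofList ∘ String.toList = id := by
      funext s; simp
    simp [this]
  rw [hsplit]
  -- inner is a permutation of sigs, so both sorts agree
  have hperm : inner.Perm sigs := (PySem.List.sorted_perm ws (fun x => x) false).map sig
  have hsorteq : PySem.List.sorted inner (fun x => x) false
      = PySem.List.sorted sigs (fun x => x) false :=
    PySem.List.sorted_eq_sorted_of_perm _ _ _ (fun _ _ h => h) hperm
  rw [hsorteq]
  -- both sides decide Nodup sigs
  have hA : pvAdjScan (PySem.List.sorted sigs (fun x => x) false) = true ↔ sigs.Nodup := by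
    rw [pv_adjScan_iff _ (PySem.List.sorted_pairwise sigs (fun x => x))]
    exact List.Perm.nodup_iff (PySem.List.sorted_perm sigs (fun x => x) false)
  have hB : (PySem.Set.len (PySem.Set.ofList sigs) == (sigs.length : Int)) = true ↔ sigs.Nodup := by
    simp only [PySem.Set.len, beq_iff_eq, Nat.cast_inj]
    exact pv_ofList_len_iff sigs
  exact Bool.eq_iff_iff.mpr (by rw [hA, hB])
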